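-- pv_equiv track=rewrite | github.com/ZPP-MURMURAS/ZPP_Murmuras | src/bert_dataset_generation/generate_coupon_selection_ds.py | __find_given_starts_ends
-- ===== SOURCE A (Python) =====
-- from typing import List, Tuple, Dict, Optional, TypedDict
--
-- def __find_given_starts_ends(string1: str, string2: str, starts: List[int], ends: List[int]):
--     """
--     Finds the first occurrence of string2 in string2
--     given lists of valid indexes for the first and the last char of string2 in string1
--     """
--     beg = 0
--     while beg < len(string1):
--         ix = beg + string1[beg:].find(string2)
--         if ix == beg - 1:
--             return -1
--         if ix in starts and ix + len(string2) - 1 in ends: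
--             return ix
--         beg = ix + 1
--     return -1
-- ===== SOURCE B (Python) =====
-- def __find_given_starts_ends(string1, string2, starts, ends):
--     n = len(string1)
--     m = len(string2)
--     good = [s for s in starts
--             if 0 <= s < n and string1[s:s + m] == string2 and s + m - 1 in ends]
--     return min(good, default=-1)
-- ===== Notes on version B (the rewrite author's own statement) =====
-- stated objective: alternative
-- what changed: Replaces A's advancing-cursor str.find while-loop over string1 with a single filter over the allowed start indices (in-range, substring match, end index allowed) followed by min(..., default=-1).
import Mathlib
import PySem

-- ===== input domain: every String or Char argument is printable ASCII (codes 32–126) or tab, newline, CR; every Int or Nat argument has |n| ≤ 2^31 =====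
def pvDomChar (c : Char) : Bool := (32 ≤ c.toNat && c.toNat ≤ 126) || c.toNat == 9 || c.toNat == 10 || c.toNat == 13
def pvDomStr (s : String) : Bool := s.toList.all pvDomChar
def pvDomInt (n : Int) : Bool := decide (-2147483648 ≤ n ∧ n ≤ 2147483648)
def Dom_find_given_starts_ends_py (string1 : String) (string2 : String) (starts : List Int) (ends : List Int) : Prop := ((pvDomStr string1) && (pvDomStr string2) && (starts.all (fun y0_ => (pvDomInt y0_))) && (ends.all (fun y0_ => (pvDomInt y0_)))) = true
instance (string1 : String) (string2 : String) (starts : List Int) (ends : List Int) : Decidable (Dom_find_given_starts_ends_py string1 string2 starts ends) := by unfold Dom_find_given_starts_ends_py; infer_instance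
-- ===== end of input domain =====

-- B replaces A's advancing-cursor find loop by filtering the allowed start indices for a
-- substring match and taking the minimum (alternative decomposition; no speed claim).

-- ===== PORT A =====
-- A's while loop: beg advances past each occurrence of string2 found in string1[beg:].
def pvLoopA (s1 s2 : List Char) (starts ends : List Int) (beg : Nat) : Int :=
  if _h : beg < s1.length then
    let ix : Int := (beg : Int) + PySem.Chars.find (List.drop beg s1) s2
    if _hneg : ix = (beg : Int) - 1 then -1
    else if ix ∈ starts ∧ ix + (s2.length : Int) - 1 ∈ ends then ix
    else pvLoopA s1 s2 starts ends (ix + 1).toNat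
  else -1
termination_by s1.length - beg
decreasing_by
  have hf := PySem.Chars.neg_one_le_find (List.drop beg s1) s2
  simp only [ix] at *
  omega

def find_given_starts_ends_py (string1 : String) (string2 : String) (starts : List Int) (ends : List Int) : Int :=
  pvLoopA string1.toList string2.toList starts ends 0

-- ===== PORT B =====
def find_given_starts_ends_py_alt (string1 : String) (string2 : String) (starts : List Int) (ends : List Int) : Int :=
  let s1 := string1.toList
  let s2 := string2.toList
  let n : Int := s1.length
  let m : Int := s2.length
  let good := starts.filter (fun s =>
    decide (0 ≤ s ∧ s < n ∧ PySem.List.slice s1 (some s) (some (s + m)) = s2 ∧ s + m - 1 ∈ ends))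
  PySem.List.minD good (fun x => x) (-1)

-- ===== PRECONDITION & SPEC =====
def Spec_find_given_starts_ends_py (string1 : String) (string2 : String) (starts : List Int) (ends : List Int) (out : Int) : Prop := out = find_given_starts_ends_py_alt string1 string2 starts ends
instance (string1 : String) (string2 : String) (starts : List Int) (ends : List Int) (out : Int) : Decidable (Spec_find_given_starts_ends_py string1 string2 starts ends out) := by unfold Spec_find_given_starts_ends_py; infer_instance

-- ===== CLAIM (what is proved, stated in full; the proofs are below) =====
def Claim_equal_find_given_starts_ends_py : Prop := ∀ (string1 : String) (string2 : String) (starts : List Int) (ends : List Int), Dom_find_given_starts_ends_py string1 string2 starts ends → Spec_find_given_starts_ends_py string1 string2 starts ends (find_given_starts_ends_py string1 string2 starts ends)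

-- ===== LEMMAS AND PROOFS =====

-- i is a position A may return: in range, string2 matches there, both memberships hold.
def pvGood (s1 s2 : List Char) (starts ends : List Int) (i : Int) : Prop :=
  0 ≤ i ∧ i < (s1.length : Int) ∧ i ∈ starts ∧ s2 <+: List.drop i.toNat s1 ∧
    i + (s2.length : Int) - 1 ∈ ends

-- string1[s:s+len(string2)] == string2  ↔  string2 is a prefix of string1 dropped at s
lemma pvSlice_eq_iff (s1 s2 : List Char) (i : Int) (h0 : 0 ≤ i) :
    PySem.List.slice s1 (some i) (some (i + (s2.length : Int))) = s2 ↔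
      s2 <+: List.drop i.toNat s1 := by
  have hi : i = (i.toNat : Int) := (Int.toNat_of_nonneg h0).symm
  rw [hi, PySem.List.slice_natCast_add]
  constructor
  · intro h; exact List.prefix_iff_eq_take.mpr h.symm
  · intro h; exact (List.prefix_iff_eq_take.mp h).symm

lemma pvMem_filter_iff (s1 s2 : List Char) (starts ends : List Int) (i : Int) :
    i ∈ starts.filter (fun s =>
        decide (0 ≤ s ∧ s < (s1.length : Int) ∧
          PySem.List.slice s1 (some s) (some (s + (s2.length : Int))) = s2 ∧
          s + (s2.length : Int) - 1 ∈ ends)) ↔ pvGood s1 s2 starts ends i := by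
  simp only [List.mem_filter, decide_eq_true_eq, pvGood]
  constructor
  · rintro ⟨hst, h0, hn, hsl, he⟩
    exact ⟨h0, hn, hst, (pvSlice_eq_iff s1 s2 i h0).mp hsl, he⟩
  · rintro ⟨h0, hn, hst, hpre, he⟩
    exact ⟨hst, h0, hn, (pvSlice_eq_iff s1 s2 i h0).mpr hpre, he⟩

-- if i ≥ beg matches, then string2 occurs somewhere in string1[beg:]
lemma pvGood_infix (s1 s2 : List Char) (starts ends : List Int) (beg : Nat) (i : Int)
    (hbi : (beg : Int) ≤ i) (hg : pvGood s1 s2 starts ends i) :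
    s2 <:+: List.drop beg s1 := by
  obtain ⟨h0, _, _, hpre, _⟩ := hg
  have : List.drop i.toNat s1 = List.drop (i.toNat - beg) (List.drop beg s1) := by
    rw [List.drop_drop]; congr 1; omega
  rw [this] at hpre
  exact hpre.isInfix.trans (List.drop_suffix _ _).isInfix

-- A's loop from beg returns the least good position ≥ beg, or -1 if there is none.
lemma pvLoopA_spec (s1 s2 : List Char) (starts ends : List Int) (beg : Nat) :
    (pvLoopA s1 s2 starts ends beg = -1 ∧
      ∀ i : Int, (beg : Int) ≤ i → ¬ pvGood s1 s2 starts ends i) ∨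
    (pvGood s1 s2 starts ends (pvLoopA s1 s2 starts ends beg) ∧
      (beg : Int) ≤ pvLoopA s1 s2 starts ends beg ∧
      ∀ i : Int, (beg : Int) ≤ i → i < pvLoopA s1 s2 starts ends beg →
        ¬ pvGood s1 s2 starts ends i) := by
  suffices H : ∀ k beg, s1.length - beg ≤ k →
      (pvLoopA s1 s2 starts ends beg = -1 ∧
        ∀ i : Int, (beg : Int) ≤ i → ¬ pvGood s1 s2 starts ends i) ∨
      (pvGood s1 s2 starts ends (pvLoopA s1 s2 starts ends beg) ∧
        (beg : Int) ≤ pvLoopA s1 s2 starts ends beg ∧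
        ∀ i : Int, (beg : Int) ≤ i → i < pvLoopA s1 s2 starts ends beg →
          ¬ pvGood s1 s2 starts ends i) by
    exact H (s1.length - beg) beg le_rfl
  intro k
  induction k with
  | zero =>
    intro beg hk
    have hbeg : s1.length ≤ beg := by omega
    rw [pvLoopA, dif_neg (by omega)]
    exact Or.inl ⟨rfl, fun i hbi hg => by
      obtain ⟨_, hn, _, _, _⟩ := hg; omega⟩
  | succ k ih =>
    intro beg hk
    by_cases hlt : beg < s1.length
    · rw [pvLoopA, dif_pos hlt]
      simp only []
      set f := PySem.Chars.find (List.drop beg s1) s2 with hfdef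
      have hfge := PySem.Chars.neg_one_le_find (List.drop beg s1) s2
      by_cases hneg : (beg : Int) + f = (beg : Int) - 1
      · rw [dif_pos hneg]
        refine Or.inl ⟨rfl, fun i hbi hg => ?_⟩
        have hfneg : f = -1 := by omega
        have hinf : ¬ s2 <:+: List.drop beg s1 :=
          (PySem.Chars.find_eq_neg_one_iff _ _).mp (hfdef ▸ hfneg)
        exact hinf (pvGood_infix s1 s2 starts ends beg i hbi hg)
      · rw [dif_neg hneg]
        have hf0 : 0 ≤ f := by omega
        obtain ⟨hpre, hmin⟩ := PySem.Chars.find_spec (sub := s2) (s := List.drop beg s1) (hfdef ▸ hf0)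
        have hdrop : List.drop f.toNat (List.drop beg s1) = List.drop ((beg : Int) + f).toNat s1 := by
          rw [List.drop_drop]; congr 1; omega
        -- ix = beg + f is in range
        have hixlt : (beg : Int) + f < (s1.length : Int) := by
          by_cases hs2 : s2 = []
          · have : f = 0 := by
              rw [hfdef, hs2]; exact PySem.Chars.find_nil _
            omega
          · have hlen : s2.length ≤ (List.drop f.toNat (List.drop beg s1)).length :=
              hpre.length_le
            have h1 : 0 < s2.length := List.length_pos_iff.mpr hs2
            simp only [List.length_drop] at hlen
            omega
        -- no good position in [beg, beg+f)
        have hnone : ∀ i : Int, (beg : Int) ≤ i → i < (beg : Int) + f →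
            ¬ pvGood s1 s2 starts ends i := by
          intro i hbi hif hg
          obtain ⟨h0, _, _, hpre', _⟩ := hg
          have : List.drop i.toNat s1 = List.drop (i.toNat - beg) (List.drop beg s1) := by
            rw [List.drop_drop]; congr 1; omega
          exact hmin (i.toNat - beg) (by omega) (this ▸ hpre')
        by_cases hmemb : ((beg : Int) + f) ∈ starts ∧ ((beg : Int) + f) + (s2.length : Int) - 1 ∈ ends
        · rw [if_pos hmemb]
          refine Or.inr ⟨⟨by omega, hixlt, hmemb.1, hdrop ▸ hpre, hmemb.2⟩, by omega, hnone⟩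
        · rw [if_neg hmemb]
          have hrec := ih (((beg : Int) + f) + 1).toNat (by omega)
          have hcast : ((((beg : Int) + f) + 1).toNat : Int) = (beg : Int) + f + 1 := by omega
          rcases hrec with ⟨heq, hno⟩ | ⟨hg, hle, hmin'⟩
          · refine Or.inl ⟨heq, fun i hbi hgi => ?_⟩
            by_cases hilt : i < (beg : Int) + f
            · exact hnone i hbi hilt hgi
            · by_cases hieq : i = (beg : Int) + f
              · subst hieq
                obtain ⟨_, _, hst, hpre', he⟩ := hgi
                exact hmemb ⟨hst, he⟩
              · exact hno i (by omega) hgi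
          · refine Or.inr ⟨hg, by omega, fun i hbi hilt hgi => ?_⟩
            by_cases hilt' : i < (beg : Int) + f
            · exact hnone i hbi hilt' hgi
            · by_cases hieq : i = (beg : Int) + f
              · subst hieq
                obtain ⟨_, _, hst, hpre', he⟩ := hgi
                exact hmemb ⟨hst, he⟩
              · exact hmin' i (by omega) hilt hgi
    · rw [pvLoopA, dif_neg hlt]
      exact Or.inl ⟨rfl, fun i hbi hg => by
        obtain ⟨_, hn, _, _, _⟩ := hg; omega⟩

-- ===== VERDICT (by name: the statement is the Claim_ definition above) =====
theorem find_given_starts_ends_py_spec : Claim_equal_find_given_starts_ends_py := by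
  unfold Claim_equal_find_given_starts_ends_py
  intro string1 string2 starts ends _hdom
  unfold Spec_find_given_starts_ends_py
  set s1 := string1.toList
  set s2 := string2.toList
  have hB : find_given_starts_ends_py_alt string1 string2 starts ends =
      (PySem.List.min? (starts.filter (fun s =>
        decide (0 ≤ s ∧ s < (s1.length : Int) ∧
          PySem.List.slice s1 (some s) (some (s + (s2.length : Int))) = s2 ∧
          s + (s2.length : Int) - 1 ∈ ends))) (fun x => x)).getD (-1) := rfl
  have hA : find_given_starts_ends_py string1 string2 starts ends =
      pvLoopA s1 s2 starts ends 0 := rfl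
  rw [hA, hB]
  have hspec := pvLoopA_spec s1 s2 starts ends 0
  cases hmin : PySem.List.min? (starts.filter (fun s =>
      decide (0 ≤ s ∧ s < (s1.length : Int) ∧
        PySem.List.slice s1 (some s) (some (s + (s2.length : Int))) = s2 ∧
        s + (s2.length : Int) - 1 ∈ ends))) (fun x => x) with
  | none =>
    have hempty := (PySem.List.min?_eq_none_iff _ _).mp hmin
    rcases hspec with ⟨heq, _⟩ | ⟨hg, _, _⟩
    · simpa using heq
    · exfalso
      have := (pvMem_filter_iff s1 s2 starts ends _).mpr hg
      rw [hempty] at this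
      exact absurd this (List.not_mem_nil)
  | some m =>
    have hmmem := PySem.List.min?_mem hmin
    have hgm : pvGood s1 s2 starts ends m := (pvMem_filter_iff s1 s2 starts ends m).mp hmmem
    have hmlb := PySem.List.min?_isMin hmin
    rcases hspec with ⟨_, hno⟩ | ⟨hg, _, hminA⟩
    · exact absurd hgm (hno m (by exact hgm.1))
    · simp only [Option.getD_some]
      have hAm : ¬ pvLoopA s1 s2 starts ends 0 < m := by
        intro hlt
        have := hmlb _ ((pvMem_filter_iff s1 s2 starts ends _).mpr hg)
        simp only [] at this
        omega
      have hmA : ¬ m < pvLoopA s1 s2 starts ends 0 :=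
        fun hlt => hminA m hgm.1 hlt hgm
      omega
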